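-- pv_equiv track=rewrite | github.com/cal65/Novelty | spotify/plotting/plotting.py | simplify_genre
-- ===== SOURCE A (Python) =====
-- def simplify_genre(genre_list):
--     replace_list = [
--         "pop",
--         "mellow",
--         "funk",
--         "indie",
--         "rap",
--         "house",
--         "rock",
--         "hip hop",
--         "reggae",
--         "soul",
--         "r&b",
--     ]
--     for genre in replace_list:
--         genre_list = [genre if genre in g else g for g in genre_list]
--     return genre_list
-- ===== SOURCE B (Python) =====
-- REPLACE_LIST = [
--     "pop", "mellow", "funk", "indie", "rap", "house",
--     "rock", "hip hop", "reggae", "soul", "r&b",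
-- ]
--
-- def simplify_genre(genre_list):
--     # No keyword in REPLACE_LIST is a substring of another, so A's sequential
--     # overwrite always ends at the FIRST keyword occurring in the original
--     # string: an early-exit first-match search, no rewriting passes at all.
--     return [next((kw for kw in REPLACE_LIST if kw in g), g) for g in genre_list]
-- ===== Notes on version B (the rewrite author's own statement) =====
-- stated objective: simpler
-- what changed: B replaces A's eleven overwrite passes by a single early-exit first-match search per string (return the first keyword occurring in the original string, else the string), correct because no keyword is a substring of another -- a fact the Lean proof establishes as a Pairwise lemma.
import Mathlib
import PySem

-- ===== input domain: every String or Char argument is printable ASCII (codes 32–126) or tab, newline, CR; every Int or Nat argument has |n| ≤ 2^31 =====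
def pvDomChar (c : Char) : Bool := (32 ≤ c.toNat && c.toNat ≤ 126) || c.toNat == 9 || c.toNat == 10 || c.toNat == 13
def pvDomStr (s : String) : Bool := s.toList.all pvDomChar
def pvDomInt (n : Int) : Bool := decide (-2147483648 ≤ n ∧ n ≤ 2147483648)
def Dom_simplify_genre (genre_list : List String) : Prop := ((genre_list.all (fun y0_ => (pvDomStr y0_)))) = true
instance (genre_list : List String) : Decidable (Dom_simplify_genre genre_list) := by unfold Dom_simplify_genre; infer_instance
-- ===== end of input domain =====

-- B change: per-string early-exit first-match over the keyword list instead of A's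
-- eleven overwrite passes; correct because no keyword is a substring of another (objective: simpler).
-- ===== PORT A =====
def pvReplaceList : List String :=
  ["pop", "mellow", "funk", "indie", "rap", "house", "rock", "hip hop", "reggae", "soul", "r&b"]

def simplify_genre (genre_list : List String) : List String :=
  pvReplaceList.foldl
    (fun gl genre => gl.map (fun g => if PySem.Str.isIn genre g then genre else g))
    genre_list

-- ===== PORT B =====
-- next((kw for kw in REPLACE_LIST if kw in g), g): first keyword occurring in g, else g
def pvFirstMatch (kws : List String) (g : String) : String :=
  match kws with
  | [] => g
  | kw :: rest => if PySem.Str.isIn kw g then kw else pvFirstMatch rest g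

def simplify_genre_alt (genre_list : List String) : List String :=
  genre_list.map (pvFirstMatch pvReplaceList)

-- ===== PRECONDITION & SPEC =====
def Spec_simplify_genre (genre_list : List String) (out : List String) : Prop := out = simplify_genre_alt genre_list
instance (genre_list : List String) (out : List String) : Decidable (Spec_simplify_genre genre_list out) := by unfold Spec_simplify_genre; infer_instance

-- ===== CLAIM (what is proved, stated in full; the proofs are below) =====
def Claim_equal_simplify_genre : Prop := ∀ (genre_list : List String), Dom_simplify_genre genre_list → Spec_simplify_genre genre_list (simplify_genre genre_list)

-- ===== LEMMAS AND PROOFS =====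

-- foldl of elementwise maps = map of per-element foldl
theorem foldl_map_comm {α β : Type} (f : β → α → α) (ks : List β) (xs : List α) :
    ks.foldl (fun l k => l.map (f k)) xs = xs.map (fun x => ks.foldl (fun r k => f k r) x) := by
  induction ks generalizing xs with
  | nil => simp
  | cons k ks ih => simp [List.foldl_cons, ih, List.map_map, Function.comp]

-- once the result is a string no remaining keyword occurs in, the overwrite fold is stable
theorem foldl_overwrite_stable (ks : List String) (x : String)
    (h : ∀ k ∈ ks, PySem.Str.isIn k x = false) :
    ks.foldl (fun r kw => if PySem.Str.isIn kw r then kw else r) x = x := by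
  induction ks with
  | nil => rfl
  | cons k ks ih =>
      rw [List.foldl_cons, if_neg (by rw [h k List.mem_cons_self]; exact Bool.false_ne_true)]
      exact ih (fun k' hk' => h k' (List.mem_cons_of_mem _ hk'))

-- if no later keyword occurs in an earlier one, the overwrite fold is the first match
theorem foldl_overwrite_eq_firstMatch (ks : List String)
    (hp : ks.Pairwise (fun a b => PySem.Str.isIn b a = false)) (g : String) :
    ks.foldl (fun r kw => if PySem.Str.isIn kw r then kw else r) g = pvFirstMatch ks g := by
  induction ks generalizing g with
  | nil => rfl
  | cons kw ks ih =>
      rcases List.pairwise_cons.mp hp with ⟨hkw, hks⟩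
      by_cases h : PySem.Str.isIn kw g = true
      · rw [List.foldl_cons, if_pos h]
        show _ = pvFirstMatch (kw :: ks) g
        rw [pvFirstMatch, if_pos h]
        exact foldl_overwrite_stable ks kw hkw
      · rw [List.foldl_cons, if_neg h]
        show _ = pvFirstMatch (kw :: ks) g
        rw [pvFirstMatch, if_neg h]
        exact ih hks g

theorem pvReplaceList_pairwise :
    pvReplaceList.Pairwise (fun a b => PySem.Str.isIn b a = false) := by decide

-- ===== VERDICT (by name: the statement is the Claim_ definition above) =====
theorem simplify_genre_spec : Claim_equal_simplify_genre := by
  intro gl _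
  unfold Spec_simplify_genre simplify_genre simplify_genre_alt
  rw [foldl_map_comm (fun kw g => if PySem.Str.isIn kw g then kw else g) pvReplaceList gl]
  exact List.map_congr_left (fun g _ =>
    foldl_overwrite_eq_firstMatch pvReplaceList pvReplaceList_pairwise g)
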